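-- pv_equiv track=rewrite | github.com/nikikiq/QA-system | basic/ranking.py | get_dist_to_question_word
-- ===== SOURCE A (Python) =====
-- def get_dist_to_question_word(target_words, sentence_words, entity):
-- 	# get positions of closed class question words
-- 	question_words_pos = []
-- 	for w in target_words:
-- 		for i in range(len(sentence_words)):
-- 			if w == sentence_words[i]:
-- 				question_words_pos.append(i)
-- 	# cannot proceed if no such closed word in sentence
-- 	if len(question_words_pos) == 0:
-- 		return None
-- 	# # (naive way to) find answer position in sentence
-- 	answer_start_pos = entity[3]
-- 	answer_end_pos = entity[4]
-- 	# calculate distance and find closest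
-- 	dists = [ min(abs(p-answer_start_pos), abs(p-answer_end_pos))
-- 		for p in question_words_pos ]
-- 	# print dists
-- 	return sum(dists)
-- ===== SOURCE B (Python) =====
-- def get_dist_to_question_word(target_words, sentence_words, entity):
-- 	# count occurrences of each target word once, then a single pass over the sentence
-- 	cnt = {}
-- 	for w in target_words:
-- 		cnt[w] = cnt.get(w, 0) + 1
-- 	hits = [(i, cnt[w]) for i, w in enumerate(sentence_words) if w in cnt]
-- 	if not hits:
-- 		return None
-- 	answer_start_pos = entity[3]
-- 	answer_end_pos = entity[4]
-- 	return sum(k * min(abs(i - answer_start_pos), abs(i - answer_end_pos))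
-- 		for i, k in hits)
-- ===== Notes on version B (the rewrite author's own statement) =====
-- stated objective: faster
-- what changed: A scans the whole sentence once per target word (nested loops) and then maps over the collected positions; B builds a count dict of the target words once and makes a single weighted pass over the sentence, so the inner sentence scan per target word disappears.
import Mathlib
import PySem

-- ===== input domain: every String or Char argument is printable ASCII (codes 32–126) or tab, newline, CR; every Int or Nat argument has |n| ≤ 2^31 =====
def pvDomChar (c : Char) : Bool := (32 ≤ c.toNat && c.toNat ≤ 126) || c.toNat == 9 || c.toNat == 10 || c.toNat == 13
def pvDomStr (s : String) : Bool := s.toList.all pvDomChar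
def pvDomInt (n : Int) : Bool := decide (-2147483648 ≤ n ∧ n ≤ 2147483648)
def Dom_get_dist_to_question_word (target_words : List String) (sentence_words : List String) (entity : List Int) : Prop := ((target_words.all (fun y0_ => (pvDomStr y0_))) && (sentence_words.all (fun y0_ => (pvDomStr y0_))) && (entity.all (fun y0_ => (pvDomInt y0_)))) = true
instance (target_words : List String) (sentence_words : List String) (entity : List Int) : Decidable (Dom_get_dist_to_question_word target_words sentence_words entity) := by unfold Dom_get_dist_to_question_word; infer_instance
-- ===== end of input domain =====

-- B replaces A's nested target×sentence scans by a counting dict over the target words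
-- and a single weighted pass over the sentence (objective: faster, asymptotic).

-- ===== PORT A =====
def get_dist_to_question_word (target_words : List String) (sentence_words : List String) (entity : List Int) : Option Int :=
  -- for w in target_words: for i in range(len(sentence_words)): if w == sentence_words[i]: append i
  let question_words_pos : List Int :=
    target_words.foldl (fun acc w =>
      (PySem.List.pyRange 0 (sentence_words.length : Int) 1).foldl
        (fun acc2 i =>
          if w = PySem.List.pyGetD sentence_words i "" then acc2 ++ [i] else acc2)
        acc) []
  if question_words_pos.length = 0 then none
  else
    match PySem.List.pyGet? entity 3, PySem.List.pyGet? entity 4 with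
    | some answer_start_pos, some answer_end_pos =>
        some ((question_words_pos.map (fun p =>
          min |p - answer_start_pos| |p - answer_end_pos|)).sum)
    | _, _ => none   -- entity[3] / entity[4] raises IndexError: excluded by Pre_

-- ===== PORT B =====
def get_dist_to_question_word_alt (target_words : List String) (sentence_words : List String) (entity : List Int) : Option Int :=
  -- cnt[w] = cnt.get(w, 0) + 1 over target_words
  let cnt : PySem.Dict String Int :=
    target_words.foldl (fun d w => d.insert w (d.getD w 0 + 1)) PySem.Dict.empty
  -- hits = [(i, cnt[w]) for i, w in enumerate(sentence_words) if w in cnt]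
  let hits : List (Int × Int) :=
    (PySem.List.enumerate sentence_words).filterMap
      (fun p => if cnt.contains p.2 then some (p.1, cnt.getD p.2 0) else none)
  if hits = [] then none
  else
    match PySem.List.pyGet? entity 3 with
    | none => none   -- entity[3] raises IndexError: excluded by Pre_
    | some answer_start_pos =>
      match PySem.List.pyGet? entity 4 with
      | none => none   -- entity[4] raises IndexError: excluded by Pre_
      | some answer_end_pos =>
          some ((hits.map (fun q =>
            q.2 * min |q.1 - answer_start_pos| |q.1 - answer_end_pos|)).sum)

-- ===== PRECONDITION & SPEC =====
-- Pre_ excludes exactly the inputs where Python A raises IndexError: some target word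
-- occurs in the sentence (so entity[3]/entity[4] are evaluated) but entity has fewer
-- than 5 elements.
def Pre_get_dist_to_question_word (target_words : List String) (sentence_words : List String) (entity : List Int) : Prop :=
  (∃ w ∈ target_words, w ∈ sentence_words) → 5 ≤ entity.length
instance (target_words : List String) (sentence_words : List String) (entity : List Int) : Decidable (Pre_get_dist_to_question_word target_words sentence_words entity) := by unfold Pre_get_dist_to_question_word; infer_instance

def pvWitness_get_dist_to_question_word : List String × List String × List Int :=
  (["who"], ["who", "is", "it"], [0, 0, 0, 1, 2])

def Spec_get_dist_to_question_word (target_words : List String) (sentence_words : List String) (entity : List Int) (out : Option Int) : Prop := out = get_dist_to_question_word_alt target_words sentence_words entity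
instance (target_words : List String) (sentence_words : List String) (entity : List Int) (out : Option Int) : Decidable (Spec_get_dist_to_question_word target_words sentence_words entity out) := by unfold Spec_get_dist_to_question_word; infer_instance

-- ===== CLAIM (what is proved, stated in full; the proofs are below) =====
def Claim_equal_get_dist_to_question_word : Prop := ∀ (target_words : List String) (sentence_words : List String) (entity : List Int), Dom_get_dist_to_question_word target_words sentence_words entity → Pre_get_dist_to_question_word target_words sentence_words entity → Spec_get_dist_to_question_word target_words sentence_words entity (get_dist_to_question_word target_words sentence_words entity)

-- ===== LEMMAS AND PROOFS =====

-- Prop-test variant of PySem.List.foldl_append_if (a filtered append loop that stores f x)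
theorem foldl_append_ite_map {α β : Type} (p : α → Prop) [DecidablePred p] (f : α → β)
    (l : List α) (acc : List β) :
    l.foldl (fun a x => if p x then a ++ [f x] else a)
      acc = acc ++ (l.filter (fun x => decide (p x))).map f := by
  induction l generalizing acc with
  | nil => simp
  | cons x l ih => by_cases h : p x <;> simp [h, ih]

-- sum distributes over flatMap
theorem sum_flatMap {α : Type} (l : List α) (g : α → List Int) :
    (l.flatMap g).sum = (l.map (fun x => (g x).sum)).sum := by
  induction l with
  | nil => simp
  | cons x l ih => simp [ih]

-- enumerate as a map over List.range
theorem enumerate_eq_range_map (sw : List String) (s : Int) :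
    PySem.List.enumerate sw s
      = (List.range sw.length).map (fun (j : Nat) => (s + (j : Int), sw.getD j "")) := by
  induction sw generalizing s with
  | nil => simp [PySem.List.enumerate]
  | cons x xs ih =>
      rw [PySem.List.enumerate_cons, ih]
      simp only [List.length_cons, List.range_succ_eq_map, List.map_cons, List.map_map]
      refine List.cons_eq_cons.mpr ⟨by simp, ?_⟩
      refine List.map_congr_left (fun j _ => ?_)
      simp [Function.comp, Nat.succ_eq_add_one]
      ring

-- B's weighted single pass, canonicalised
theorem hits_sum (l : List Nat) (c : Nat → Bool) (k m : Nat → Int) (G : Int → Int) :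
    (((l.filterMap (fun j => if c j then some (m j, k j) else none)).map
        (fun q : Int × Int => q.2 * G q.1)).sum)
      = (l.map (fun j => (if c j then k j else 0) * G (m j))).sum := by
  induction l with
  | nil => simp
  | cons j l ih =>
      by_cases h : c j = true <;> simp [h, ih]

-- a 0/1-weighted sum is the sum over the filtered list
theorem sum_ite_filter (l : List Nat) (key : Nat → String) (F : Nat → Int) (w : String) :
    (l.map (fun j => if w = key j then F j else 0)).sum
      = ((l.filter (fun j => w = key j)).map F).sum := by
  induction l with
  | nil => simp
  | cons j l ihl =>
      simp only [List.map_cons, List.sum_cons, List.filter_cons, ihl]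
      by_cases h : w = key j <;> simp [h]

-- A's nested loops, canonicalised: sum over target words of per-word sums
theorem nested_sum (tw : List String) (l : List Nat) (key : Nat → String) (F : Nat → Int) :
    ((tw.map (fun w => ((l.filter (fun j => w = key j)).map F).sum)).sum : Int)
      = (l.map (fun j => (tw.count (key j) : Int) * F j)).sum := by
  induction tw with
  | cons w tw ih =>
      simp only [List.map_cons, List.sum_cons, ih, List.count_cons]
      have h1 : ∀ j : Nat, ((tw.count (key j) + if w == key j then 1 else 0 : Nat) : Int) * F j
          = (if w = key j then F j else 0) + (tw.count (key j) : Int) * F j := by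
        intro j; by_cases h : w = key j
        · simp [h]; ring
        · have hb : (w == key j) = false := by simp [h]
          simp [h, hb]
      rw [List.map_congr_left (fun j _ => h1 j), List.sum_map_add]
      rw [sum_ite_filter]
  | nil => simp

-- ===== VERDICT (by name: the statement is the Claim_ definition above) =====
theorem get_dist_to_question_word_spec : Claim_equal_get_dist_to_question_word := by
  intro tw sw entity _ _
  unfold Spec_get_dist_to_question_word get_dist_to_question_word get_dist_to_question_word_alt
  -- canonicalise A's position list
  rw [PySem.List.pyRange_zero_natCast]
  simp only [List.foldl_map, PySem.List.pyGetD_natCast]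
  rw [show (fun (acc : List Int) (w : String) =>
        (List.range sw.length).foldl
          (fun acc2 j => if w = sw.getD j "" then acc2 ++ [(j : Int)] else acc2) acc)
      = (fun acc w => acc ++ ((List.range sw.length).filter
          (fun j => decide (w = sw.getD j ""))).map (fun (j : Nat) => (j : Int)))
    from funext fun acc => funext fun w =>
      foldl_append_ite_map (fun j => w = sw.getD j "") (fun (j : Nat) => (j : Int)) _ acc]
  rw [PySem.List.foldl_append_eq_flatMap]
  -- canonicalise B's counter and hits
  rw [PySem.Dict.foldl_insert_getD_add_one_eq_counter, enumerate_eq_range_map,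
      List.filterMap_map]
  simp only [Function.comp, PySem.Dict.contains_counter, PySem.Dict.getD_counter, zero_add,
    List.nil_append]
  -- the two emptiness tests agree
  have hiff : ((List.flatMap (fun w =>
        ((List.range sw.length).filter (fun j => decide (w = sw.getD j ""))).map
          (fun (j : Nat) => (j : Int))) tw).length = 0)
      ↔ (List.filterMap (fun (x : Nat) =>
            if tw.contains (sw.getD x "") = true then
              some ((x : Int), ((tw.count (sw.getD x "")) : Int)) else none)
          (List.range sw.length) = []) := by
    rw [List.length_eq_zero_iff, List.flatMap_eq_nil_iff, List.filterMap_eq_nil_iff]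
    constructor
    · intro h p hp
      by_cases hc : tw.contains (sw.getD p "") = true
      · exfalso
        have hw : sw.getD p "" ∈ tw := List.contains_iff_mem.mp hc
        have h2 := h _ hw
        simp only [List.map_eq_nil_iff, List.filter_eq_nil_iff] at h2
        exact h2 p hp (by simp)
      · rw [if_neg hc]
    · intro h w hw
      simp only [List.map_eq_nil_iff, List.filter_eq_nil_iff]
      intro j hj hEq
      have h2 := h j hj
      rw [decide_eq_true_eq] at hEq
      have hc : tw.contains (sw.getD j "") = true :=
        List.contains_iff_mem.mpr (hEq ▸ hw)
      rw [if_pos hc] at h2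
      simp at h2
  by_cases hz : (List.flatMap (fun w =>
        ((List.range sw.length).filter (fun j => decide (w = sw.getD j ""))).map
          (fun (j : Nat) => (j : Int))) tw).length = 0
  · rw [if_pos hz, if_pos (hiff.mp hz)]
  · rw [if_neg hz, if_neg (fun h => hz (hiff.mpr h))]
    rcases PySem.List.pyGet? entity 3 with _ | s
    · rfl
    rcases PySem.List.pyGet? entity 4 with _ | e
    · rfl
    -- both sums are the count-weighted sum over the sentence positions
    refine congrArg some ?_
    rw [List.map_flatMap]
    simp only [List.map_map, Function.comp_def]
    rw [sum_flatMap, nested_sum tw (List.range sw.length) (fun j => sw.getD j "")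
        (fun j => min |(j : Int) - s| |(j : Int) - e|),
      hits_sum (List.range sw.length) (fun j => tw.contains (sw.getD j ""))
        (fun j => ((tw.count (sw.getD j "")) : Int)) (fun j => (j : Int))
        (fun i => min |i - s| |i - e|)]
    refine congrArg _ (List.map_congr_left fun j _ => ?_)
    by_cases hm : sw.getD j "" ∈ tw
    · rw [if_pos (List.contains_iff_mem.mpr hm)]
    · rw [if_neg (fun hc => hm (List.contains_iff_mem.mp hc)),
        List.count_eq_zero_of_not_mem hm]
      simp
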